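-- pv_equiv track=rewrite | github.com/Derfies/wavefunction-collapse | main.py | parse_example_matrix
-- ===== SOURCE A (Python) =====
-- UP = (0, 1)
--
-- LEFT = (-1, 0)
--
-- DOWN = (0, -1)
--
-- RIGHT = (1, 0)
--
-- def valid_dirs(cur_co_ord, matrix_size):
--     """
--     Returns the valid directions from `cur_co_ord` in a matrix of `matrix_size`.
--     Ensures that we don't try to take step to the left when we are already on
--     the left edge of the matrix.
--
--     """
--     x, y = cur_co_ord
--     width, height = matrix_size
--     dirs = []
--
--     if x > 0: dirs.append(LEFT)
--     if x < width-1: dirs.append(RIGHT)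
--     if y > 0: dirs.append(DOWN)
--     if y < height-1: dirs.append(UP)
--
--     return dirs
--
-- def parse_example_matrix(matrix):
--     """
--     Parses an example `matrix`. Extracts:
--
--     1. Tile compatibilities - which pairs of tiles can be placed next
--         to each other and in which directions
--     2. Tile weights - how common different tiles are
--
--     Arguments:
--     matrix -- a 2-D matrix of tiles
--
--     Returns:
--     A tuple of:
--     * A set of compatibile tile combinations, where each combination is of
--         the form (tile1, tile2, direction)
--     * A dict of weights of the form tile -> weight
--
--     """
--     compatibilities = set()
--     matrix_width = len(matrix)
--     matrix_height = len(matrix[0])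
--
--     weights = {}
--
--     for x, row in enumerate(matrix):
--         for y, cur_tile in enumerate(row):
--             weights.setdefault(cur_tile, 0)
--             weights[cur_tile] += 1
--
--             for d in valid_dirs((x,y), (matrix_width, matrix_height)):
--                 other_tile = matrix[x+d[0]][y+d[1]]
--                 compatibilities.add((cur_tile, other_tile, d))
--
--     return compatibilities, weights
-- ===== SOURCE B (Python) =====
-- UP = (0, 1)
-- LEFT = (-1, 0)
-- DOWN = (0, -1)
-- RIGHT = (1, 0)
--
--
-- def parse_example_matrix(matrix):
--     # Stage 1: adjacencies, by streaming each row zipped with its shifted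
--     # neighbourhoods (previous row, next row, in-row predecessor/successor).
--     # No coordinates, no index arithmetic, no per-cell direction helper:
--     # a neighbour exists exactly when its slot in the shifted list is not None.
--     edges = []
--     aboves = [None] + matrix[:-1]
--     belows = matrix[1:] + [None]
--     for row, above, below in zip(matrix, aboves, belows):
--         n = len(row)
--         lefts = above if above is not None else [None] * n
--         rights = below if below is not None else [None] * n
--         downs = [None] + row[:-1]
--         ups = row[1:] + [None]
--         for cur, lt, rt, dn, up in zip(row, lefts, rights, downs, ups):
--             edges += ([(cur, lt, LEFT)] if lt is not None else []) \
--                    + ([(cur, rt, RIGHT)] if rt is not None else []) \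
--                    + ([(cur, dn, DOWN)] if dn is not None else []) \
--                    + ([(cur, up, UP)] if up is not None else [])
--     # Stage 2: weights, a plain counting pass over the tiles.
--     weights = {}
--     for row in matrix:
--         for tile in row:
--             weights[tile] = weights.get(tile, 0) + 1
--     return set(edges), weights
-- ===== Notes on version B (the rewrite author's own statement) =====
-- stated objective: alternative
-- what changed: B replaces A's fused coordinate-indexed pass (enumerate x/y, valid_dirs edge guards, random access matrix[x+dx][y+dy]) by two staged passes: adjacencies come from zipping each row against its shifted neighbourhoods (previous/next row, in-row predecessor/successor) where a neighbour exists iff its slot is non-None, and weights from a separate plain counting pass.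
-- outside the precondition, e.g. on parse_example_matrix([]): A raises IndexError, B returns (set(), {})
import Mathlib
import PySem

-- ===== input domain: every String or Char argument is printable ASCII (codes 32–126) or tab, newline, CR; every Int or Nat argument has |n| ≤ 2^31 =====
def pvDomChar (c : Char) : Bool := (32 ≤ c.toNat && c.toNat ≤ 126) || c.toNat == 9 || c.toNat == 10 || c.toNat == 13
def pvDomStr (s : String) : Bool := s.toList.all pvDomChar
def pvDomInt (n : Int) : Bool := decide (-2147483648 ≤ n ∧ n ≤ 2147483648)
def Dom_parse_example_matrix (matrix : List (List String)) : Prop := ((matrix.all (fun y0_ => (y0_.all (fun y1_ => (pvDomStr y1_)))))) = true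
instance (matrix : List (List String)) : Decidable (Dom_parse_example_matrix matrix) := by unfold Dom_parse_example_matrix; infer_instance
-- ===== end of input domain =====

-- B restructures A's fused coordinate-indexed pass (enumerate x/y, valid_dirs guards, random
-- access matrix[x+dx][y+dy]) into two staged passes: adjacencies by zipping each row against its
-- shifted neighbourhoods, weights by a separate counting pass (objective: alternative).

-- ===== PORT A =====
def pvUP : Int × Int := (0, 1)
def pvLEFT : Int × Int := (-1, 0)
def pvDOWN : Int × Int := (0, -1)
def pvRIGHT : Int × Int := (1, 0)

def valid_dirs (cur_co_ord : Int × Int) (matrix_size : Int × Int) : List (Int × Int) :=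
  let x := cur_co_ord.1
  let y := cur_co_ord.2
  let width := matrix_size.1
  let height := matrix_size.2
  let dirs : List (Int × Int) := []
  let dirs := if x > 0 then dirs ++ [pvLEFT] else dirs
  let dirs := if x < width - 1 then dirs ++ [pvRIGHT] else dirs
  let dirs := if y > 0 then dirs ++ [pvDOWN] else dirs
  let dirs := if y < height - 1 then dirs ++ [pvUP] else dirs
  dirs

-- matrix[0] and matrix[x+d[0]][y+d[1]] raise IndexError out of range; Pre_ excludes exactly
-- those inputs, so the pyGetD defaults below are never taken on admitted inputs.
def parse_example_matrix (matrix : List (List String)) : (List (String × String × (Int × Int))) × (List (String × Int)) :=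
  let matrix_width : Int := matrix.length
  let matrix_height : Int := (PySem.List.pyGetD matrix 0 []).length
  let res :=
    (PySem.List.enumerate matrix).foldl (fun st xr =>
      (PySem.List.enumerate xr.2).foldl (fun st yc =>
        let weights := st.2.setdefault yc.2 0
        let weights := weights.insert yc.2 (weights.getD yc.2 0 + 1)
        let compatibilities := (valid_dirs (xr.1, yc.1) (matrix_width, matrix_height)).foldl
          (fun s d => PySem.Set.add s
            (yc.2, PySem.List.pyGetD (PySem.List.pyGetD matrix (xr.1 + d.1) []) (yc.1 + d.2) "", d)) st.1
        (compatibilities, weights)) st)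
      ((PySem.Set.empty : PySem.Set (String × String × (Int × Int))), (PySem.Dict.empty : PySem.Dict String Int))
  (res.1, res.2.items)

-- ===== PORT B =====
-- the per-cell emitted triples: Source B's four conditional singleton lists, concatenated
def pvCellB (c : String × (Option String × (Option String × (Option String × Option String)))) : List (String × String × (Int × Int)) :=
  (match c.2.1 with | some t => [(c.1, t, pvLEFT)] | none => []) ++
  (match c.2.2.1 with | some t => [(c.1, t, pvRIGHT)] | none => []) ++
  (match c.2.2.2.1 with | some t => [(c.1, t, pvDOWN)] | none => []) ++
  (match c.2.2.2.2 with | some t => [(c.1, t, pvUP)] | none => [])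

-- Faithful to Source B: matrix[:-1] = dropLast, matrix[1:] = drop 1 (exact for these slice forms);
-- Python keeps the neighbour rows/tiles themselves and tests 'is not None' — the typed form
-- wraps the present tiles in 'some' (.map some), so the None-tests become Option matches.
def parse_example_matrix_alt (matrix : List (List String)) : (List (String × String × (Int × Int))) × (List (String × Int)) :=
  let aboves : List (Option (List String)) := [none] ++ matrix.dropLast.map some
  let belows : List (Option (List String)) := (matrix.drop 1).map some ++ [none]
  let edges :=
    (matrix.zip (aboves.zip belows)).foldl (fun es rab =>
      let row := rab.1
      let n := row.length
      let lefts : List (Option String) :=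
        match rab.2.1 with | some a => a.map some | none => List.replicate n none
      let rights : List (Option String) :=
        match rab.2.2 with | some b => b.map some | none => List.replicate n none
      let downs : List (Option String) := [none] ++ row.dropLast.map some
      let ups : List (Option String) := (row.drop 1).map some ++ [none]
      (row.zip (lefts.zip (rights.zip (downs.zip ups)))).foldl (fun es c => es ++ pvCellB c) es) []
  let weights := matrix.foldl (fun w row =>
      row.foldl (fun (w : PySem.Dict String Int) tile => w.insert tile (w.getD tile 0 + 1)) w)
    PySem.Dict.empty
  (PySem.Set.ofList edges, weights.items)

-- ===== PRECONDITION & SPEC =====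
-- Pre_ excludes exactly the inputs on which A raises IndexError: the empty matrix
-- (len(matrix[0])) and ragged matrices (a cell of a longer row indexes past the end of an
-- adjacent shorter row). On every other input A returns normally.
def Pre_parse_example_matrix (matrix : List (List String)) : Prop :=
  matrix ≠ [] ∧ ∀ row ∈ matrix, row.length = (matrix.headD []).length
instance (matrix : List (List String)) : Decidable (Pre_parse_example_matrix matrix) := by
  unfold Pre_parse_example_matrix; infer_instance

def pvWitness_parse_example_matrix : List (List String) := [["a", "b"], ["c", "a"]]

def Spec_parse_example_matrix (matrix : List (List String)) (out : (List (String × String × (Int × Int))) × (List (String × Int))) : Prop := out = parse_example_matrix_alt matrix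
instance (matrix : List (List String)) (out : (List (String × String × (Int × Int))) × (List (String × Int))) : Decidable (Spec_parse_example_matrix matrix out) := by unfold Spec_parse_example_matrix; infer_instance

-- ===== CLAIM (what is proved, stated in full; the proofs are below) =====
def Claim_equal_parse_example_matrix : Prop := ∀ (matrix : List (List String)), Dom_parse_example_matrix matrix → Pre_parse_example_matrix matrix → Spec_parse_example_matrix matrix (parse_example_matrix matrix)

-- ===== LEMMAS AND PROOFS =====

-- A's triple for one neighbour direction
def pvTri (m : List (List String)) (x y : Int) (cur : String) (d : Int × Int) : String × String × (Int × Int) :=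
  (cur, PySem.List.pyGetD (PySem.List.pyGetD m (x + d.1) []) (y + d.2) "", d)

theorem pv_valid_dirs_eq (x y w h : Int) :
    valid_dirs (x, y) (w, h)
      = (if x > 0 then [pvLEFT] else []) ++ (if x < w - 1 then [pvRIGHT] else [])
        ++ (if y > 0 then [pvDOWN] else []) ++ (if y < h - 1 then [pvUP] else []) := by
  simp only [valid_dirs]
  split_ifs <;> simp

-- flatMaps over index-aligned lists agree
theorem pv_flatMap_eq {α β γ : Type} (l1 : List α) (l2 : List β) (f : α → List γ) (g : β → List γ)
    (hlen : l1.length = l2.length)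
    (h : ∀ (k : Nat) (h1 : k < l1.length) (h2 : k < l2.length), f l1[k] = g l2[k]) :
    l1.flatMap f = l2.flatMap g := by
  rw [List.flatMap_def, List.flatMap_def]
  congr 1
  apply List.ext_getElem (by simpa using hlen)
  intro k hk1 hk2
  simp only [List.getElem_map]
  exact h k (by simpa using hk1) (by simpa using hk2)

-- splitting a nested fold over a pair state updated componentwise
theorem pv_foldl_pair_split {α β σ₁ σ₂ : Type} (h : α → List β)
    (f : σ₁ → α → β → σ₁) (g : σ₂ → β → σ₂) (l : List α) (a : σ₁) (b : σ₂) :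
    l.foldl (fun st xr => (h xr).foldl (fun st yc => (f st.1 xr yc, g st.2 yc)) st) (a, b)
      = (l.foldl (fun c xr => (h xr).foldl (fun c yc => f c xr yc) c) a,
         l.foldl (fun w xr => (h xr).foldl (fun w yc => g w yc) w) b) := by
  induction l generalizing a b with
  | nil => rfl
  | cons r t ih =>
    simp only [List.foldl_cons]
    rw [PySem.List.foldl_prod_mk (fun c yc => f c r yc) g (h r) a b]
    exact ih _ _

-- a fold over enumerate that only reads the element equals the fold over the list
theorem pv_enum_foldl_snd {α σ : Type} (step : σ → α → σ) (l : List α) (s : Int) (w0 : σ) :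
    (PySem.List.enumerate l s).foldl (fun w p => step w p.2) w0 = l.foldl step w0 := by
  induction l generalizing s w0 with
  | nil => rfl
  | cons a t ih =>
    rw [PySem.List.enumerate_cons]
    simp only [List.foldl_cons]
    exact ih _ _

-- A's setdefault-then-increment step is the Counter step
theorem pv_weights_step_eq (d : PySem.Dict String Int) (c : String) :
    (d.setdefault c 0).insert c ((d.setdefault c 0).getD c 0 + 1)
      = d.modify c 0 (fun v => v + 1) := by
  by_cases hc : d.contains c = true
  · rw [PySem.Dict.setdefault_of_contains d 0 hc]
    rfl
  · have hc' : d.contains c = false := by simpa using hc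
    have hg : d.get? c = none := by
      have := PySem.Dict.contains_eq_isSome_get? d c
      rw [hc'] at this
      exact Option.not_isSome_iff_eq_none.mp (by simp [← this])
    rw [PySem.Dict.setdefault_of_not_contains d 0 hc']
    rw [PySem.Dict.insert_insert_self]
    simp [PySem.Dict.modify, PySem.Dict.getD, PySem.Dict.get?_insert_self, hg]


-- one cell: A's direction-guarded triples equal B's option-slot triples
theorem pv_cell_core (m : List (List String)) (x k L H : Nat) (_hL : m.length = L)
    (hx : x < L) (hk : k < H)
    (row : List String) (hrow : PySem.List.pyGetD m (x : Int) [] = row)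
    (lt rt dn up : Option String) (cur : String)
    (hlt : lt = if 0 < x then some (PySem.List.pyGetD (PySem.List.pyGetD m ((x : Int) - 1) []) (k : Int) "") else none)
    (hrt : rt = if x + 1 < L then some (PySem.List.pyGetD (PySem.List.pyGetD m ((x : Int) + 1) []) (k : Int) "") else none)
    (hdn : dn = if 0 < k then some (PySem.List.pyGetD row ((k : Int) - 1) "") else none)
    (hup : up = if k + 1 < H then some (PySem.List.pyGetD row ((k : Int) + 1) "") else none) :
    (valid_dirs ((x : Int), (k : Int)) ((L : Int), (H : Int))).map (pvTri m (x : Int) (k : Int) cur)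
      = pvCellB (cur, lt, rt, dn, up) := by
  subst hlt hrt hdn hup
  rw [pv_valid_dirs_eq]
  have g1 : ((x : Int) > 0) ↔ (0 < x) := by omega
  have g2 : ((x : Int) < (L : Int) - 1) ↔ (x + 1 < L) := by omega
  have g3 : ((k : Int) > 0) ↔ (0 < k) := by omega
  have g4 : ((k : Int) < (H : Int) - 1) ↔ (k + 1 < H) := by omega
  by_cases c1 : 0 < x <;> by_cases c2 : x + 1 < L <;> by_cases c3 : 0 < k <;> by_cases c4 : k + 1 < H <;>
    simp only [g1, g2, g3, g4, if_pos, c1, c2, c3, c4, if_false,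
      List.map_append, List.map_cons, List.map_nil, pvCellB, pvTri,
      pvLEFT, pvRIGHT, pvDOWN, pvUP] <;>
    simp [hrow, sub_eq_add_neg]

-- key index lemma: one row's A-stream equals its B-stream
theorem pv_row_eq (m : List (List String)) (H : Nat) (hH : ∀ r ∈ m, r.length = H)
    (x : Nat) (hx : x < m.length) (above below : Option (List String))
    (habove : above = if hx0 : 0 < x then some (m[x - 1]'(by omega)) else none)
    (hbelow : below = if hx1 : x + 1 < m.length then some (m[x + 1]'hx1) else none) :
    (PySem.List.enumerate m[x] 0).flatMap (fun yc =>
        (valid_dirs ((x : Int), yc.1) ((m.length : Int), (H : Int))).map (pvTri m (x : Int) yc.1 yc.2))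
      = (m[x].zip
          ((match above with | some a => a.map some | none => List.replicate m[x].length none).zip
           (((match below with | some b => b.map some | none => List.replicate m[x].length none)).zip
            (([none] ++ m[x].dropLast.map some).zip ((m[x].drop 1).map some ++ [none]))))).flatMap
          pvCellB := by
  subst habove hbelow
  have hrowlen : m[x].length = H := hH _ (List.getElem_mem hx)
  have hdn : ∀ (k : Nat) (hk : k < m[x].length),
      ([(none : Option String)] ++ m[x].dropLast.map some)[k]'(by
        simp only [List.length_append, List.length_map, List.length_dropLast,
          List.length_cons, List.length_nil]
        omega)
        = if 0 < k then some (PySem.List.pyGetD m[x] ((k : Int) - 1) "") else none := by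
    intro k hk
    by_cases hk0 : 0 < k
    · rw [if_pos hk0, List.getElem_append]
      rw [dif_neg (by simp; omega)]
      simp only [List.length_cons, List.length_nil, List.getElem_map, List.getElem_dropLast]
      have e : (k : Int) - 1 = ((k - 1 : Nat) : Int) := by omega
      rw [e, PySem.List.pyGetD_ofNat m[x] (k - 1) "" (by omega)]
    · have : k = 0 := by omega
      subst this
      rw [if_neg hk0]
      rfl
  have hup : ∀ (k : Nat) (hk : k < m[x].length),
      ((m[x].drop 1).map some ++ [(none : Option String)])[k]'(by
        simp only [List.length_append, List.length_map, List.length_drop,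
          List.length_cons, List.length_nil]
        omega)
        = if k + 1 < H then some (PySem.List.pyGetD m[x] ((k : Int) + 1) "") else none := by
    intro k hk
    by_cases hk1 : k + 1 < H
    · rw [if_pos hk1, List.getElem_append]
      rw [dif_pos (by simp; omega)]
      simp only [List.getElem_map, List.getElem_drop]
      have e : (k : Int) + 1 = ((1 + k : Nat) : Int) := by omega
      rw [e, PySem.List.pyGetD_ofNat m[x] (1 + k) "" (by omega)]
    · rw [if_neg hk1, List.getElem_append]
      rw [dif_neg (by simp only [List.length_map, List.length_drop]; omega)]
      simp
  have hrowget : PySem.List.pyGetD m ((x : Int)) [] = m[x] := PySem.List.pyGetD_ofNat m x [] hx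
  split_ifs with hx0 hx1 hx1
  -- x interior / top row / bottom row / single row
  ·
    have ha' : m[x - 1].length = H := hH _ (List.getElem_mem (by omega))
    have hb' : m[x + 1].length = H := hH _ (List.getElem_mem hx1)
    apply pv_flatMap_eq
    · simp [PySem.List.length_enumerate, List.length_zip, hrowlen, ha', hb',
        List.length_dropLast]
      omega
    · intro k h1 h2
      have hk : k < m[x].length := by simpa [PySem.List.length_enumerate] using h1
      have hkH : k < H := by omega
      rw [PySem.List.getElem_enumerate]
      simp only [zero_add, List.getElem_zip]
      refine pv_cell_core m x k m.length H rfl hx hkH m[x] hrowget _ _ _ _ _ ?_ ?_ ?_ ?_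
      · rw [if_pos hx0, List.getElem_map]
        have e : (x : Int) - 1 = ((x - 1 : Nat) : Int) := by omega
        rw [e, PySem.List.pyGetD_ofNat m (x - 1) [] (by omega),
          PySem.List.pyGetD_ofNat m[x - 1] k "" (by omega)]
      · rw [if_pos hx1, List.getElem_map]
        have e : (x : Int) + 1 = ((x + 1 : Nat) : Int) := by omega
        rw [e, PySem.List.pyGetD_ofNat m (x + 1) [] hx1,
          PySem.List.pyGetD_ofNat m[x + 1] k "" (by omega)]
      · exact hdn k hk
      · exact hup k hk
  ·
    have ha' : m[x - 1].length = H := hH _ (List.getElem_mem (by omega))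
    apply pv_flatMap_eq
    · simp [PySem.List.length_enumerate, List.length_zip, hrowlen, ha',
        List.length_dropLast]
      omega
    · intro k h1 h2
      have hk : k < m[x].length := by simpa [PySem.List.length_enumerate] using h1
      have hkH : k < H := by omega
      rw [PySem.List.getElem_enumerate]
      simp only [zero_add, List.getElem_zip]
      refine pv_cell_core m x k m.length H rfl hx hkH m[x] hrowget _ _ _ _ _ ?_ ?_ ?_ ?_
      · rw [if_pos hx0, List.getElem_map]
        have e : (x : Int) - 1 = ((x - 1 : Nat) : Int) := by omega
        rw [e, PySem.List.pyGetD_ofNat m (x - 1) [] (by omega),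
          PySem.List.pyGetD_ofNat m[x - 1] k "" (by omega)]
      · rw [if_neg hx1, List.getElem_replicate]
      · exact hdn k hk
      · exact hup k hk
  ·
    have hb' : m[x + 1].length = H := hH _ (List.getElem_mem hx1)
    apply pv_flatMap_eq
    · simp [PySem.List.length_enumerate, List.length_zip, hrowlen, hb',
        List.length_dropLast]
      omega
    · intro k h1 h2
      have hk : k < m[x].length := by simpa [PySem.List.length_enumerate] using h1
      have hkH : k < H := by omega
      rw [PySem.List.getElem_enumerate]
      simp only [zero_add, List.getElem_zip]
      refine pv_cell_core m x k m.length H rfl hx hkH m[x] hrowget _ _ _ _ _ ?_ ?_ ?_ ?_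
      · rw [if_neg hx0, List.getElem_replicate]
      · rw [if_pos hx1, List.getElem_map]
        have e : (x : Int) + 1 = ((x + 1 : Nat) : Int) := by omega
        rw [e, PySem.List.pyGetD_ofNat m (x + 1) [] hx1,
          PySem.List.pyGetD_ofNat m[x + 1] k "" (by omega)]
      · exact hdn k hk
      · exact hup k hk
  ·
    apply pv_flatMap_eq
    · simp [PySem.List.length_enumerate, List.length_zip, hrowlen,
        List.length_dropLast]
      omega
    · intro k h1 h2
      have hk : k < m[x].length := by simpa [PySem.List.length_enumerate] using h1
      have hkH : k < H := by omega
      rw [PySem.List.getElem_enumerate]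
      simp only [zero_add, List.getElem_zip]
      refine pv_cell_core m x k m.length H rfl hx hkH m[x] hrowget _ _ _ _ _ ?_ ?_ ?_ ?_
      · rw [if_neg hx0, List.getElem_replicate]
      · rw [if_neg hx1, List.getElem_replicate]
      · exact hdn k hk
      · exact hup k hk

-- ===== VERDICT (by name: the statement is the Claim_ definition above) =====
theorem parse_example_matrix_spec : Claim_equal_parse_example_matrix := by
  intro m hdom hpre
  unfold Spec_parse_example_matrix
  obtain ⟨hne, hrect⟩ := hpre
  have hh : PySem.List.pyGetD m 0 [] = m.headD [] := by
    cases m with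
    | nil => exact absurd rfl hne
    | cons a t => simp [PySem.List.pyGetD]
  simp only [parse_example_matrix, parse_example_matrix_alt]
  rw [pv_foldl_pair_split
    (fun (xr : Int × List String) => PySem.List.enumerate xr.2)
    (fun (c : PySem.Set (String × String × (Int × Int))) xr yc =>
      (valid_dirs (xr.1, yc.1) ((m.length : Int), ((PySem.List.pyGetD m 0 []).length : Int))).foldl
        (fun s d => PySem.Set.add s
          (yc.2, PySem.List.pyGetD (PySem.List.pyGetD m (xr.1 + d.1) []) (yc.1 + d.2) "", d)) c)
    (fun (w : PySem.Dict String Int) (yc : Int × String) =>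
      (w.setdefault yc.2 0).insert yc.2 ((w.setdefault yc.2 0).getD yc.2 0 + 1))
    (PySem.List.enumerate m) PySem.Set.empty PySem.Dict.empty]
  simp only [Prod.mk.injEq]
  refine ⟨?_, ?_⟩
  · -- compatibilities
    rw [hh]
    -- A's nested fold = fold of Set.add over A's flat stream
    have hA : (PySem.List.enumerate m).foldl
        (fun (c : PySem.Set (String × String × (Int × Int))) xr =>
          (PySem.List.enumerate xr.2).foldl (fun c yc =>
            (valid_dirs (xr.1, yc.1) ((m.length : Int), ((m.headD []).length : Int))).foldl
              (fun s d => PySem.Set.add s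
                (yc.2, PySem.List.pyGetD (PySem.List.pyGetD m (xr.1 + d.1) []) (yc.1 + d.2) "", d)) c) c)
        PySem.Set.empty
        = ((PySem.List.enumerate m).flatMap (fun xr =>
            (PySem.List.enumerate xr.2).flatMap (fun yc =>
              (valid_dirs (xr.1, yc.1) ((m.length : Int), ((m.headD []).length : Int))).map
                (pvTri m xr.1 yc.1 yc.2)))).foldl PySem.Set.add PySem.Set.empty := by
      rw [List.foldl_flatMap]
      refine PySem.List.foldl_congr_mem _ _ _ _ (fun acc xr _ => ?_)
      rw [List.foldl_flatMap]
      refine PySem.List.foldl_congr_mem _ _ _ _ (fun acc2 yc _ => ?_)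
      rw [List.foldl_map]
      rfl
    rw [hA]
    rw [PySem.Set.ofList_eq_foldl]
    simp only [PySem.List.foldl_append_eq_flatMap, List.nil_append]
    -- the two flat streams coincide
    congr 1
    apply pv_flatMap_eq
    · have h1 : m.length ≠ 0 := by
        cases m
        · exact absurd rfl hne
        · simp
      simp only [PySem.List.length_enumerate, List.length_zip, List.length_append,
        List.length_map, List.length_dropLast, List.length_drop, List.length_cons,
        List.length_nil]
      omega
    · intro x h1 h2
      have hx : x < m.length := by simpa [PySem.List.length_enumerate] using h1
      rw [PySem.List.getElem_enumerate]
      simp only [zero_add, List.getElem_zip]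
      have habove : (([none] ++ m.dropLast.map some) : List (Option (List String)))[x]'(by
          simp only [List.length_append, List.length_map, List.length_dropLast,
            List.length_cons, List.length_nil]
          omega)
          = if hx0 : 0 < x then some (m[x - 1]'(by omega)) else none := by
        cases x with
        | zero => rfl
        | succ j =>
          rw [dif_pos (Nat.succ_pos j)]
          simp [List.getElem_dropLast]
      have hbelow : (((m.drop 1).map some ++ [none]) : List (Option (List String)))[x]'(by
          simp only [List.length_append, List.length_map, List.length_drop,
            List.length_cons, List.length_nil]
          omega)
          = if hx1 : x + 1 < m.length then some (m[x + 1]'hx1) else none := by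
        by_cases hx1 : x + 1 < m.length
        · rw [dif_pos hx1, List.getElem_append,
            dif_pos (by simp only [List.length_map, List.length_drop]; omega)]
          simp
        · rw [dif_neg hx1, List.getElem_append,
            dif_neg (by simp only [List.length_map, List.length_drop]; omega)]
          simp
      rw [habove, hbelow]
      exact pv_row_eq m (m.headD []).length hrect x hx _ _ rfl rfl
  · -- weights
    have henum : ∀ (acc : PySem.Dict String Int) (row : List String),
        (PySem.List.enumerate row).foldl
          (fun (w : PySem.Dict String Int) (yc : Int × String) =>
            (w.setdefault yc.2 0).insert yc.2 ((w.setdefault yc.2 0).getD yc.2 0 + 1)) acc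
        = row.foldl
          (fun (w : PySem.Dict String Int) (c : String) =>
            (w.setdefault c 0).insert c ((w.setdefault c 0).getD c 0 + 1)) acc :=
      fun acc row => pv_enum_foldl_snd
        (fun (w : PySem.Dict String Int) (c : String) =>
          (w.setdefault c 0).insert c ((w.setdefault c 0).getD c 0 + 1)) row 0 acc
    have h1 : (PySem.List.enumerate m).foldl
        (fun (w : PySem.Dict String Int) (xr : Int × List String) =>
          (PySem.List.enumerate xr.2).foldl
            (fun (w : PySem.Dict String Int) (yc : Int × String) =>
              (w.setdefault yc.2 0).insert yc.2 ((w.setdefault yc.2 0).getD yc.2 0 + 1)) w)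
        PySem.Dict.empty
        = PySem.Dict.counter (m.flatMap (fun row => row)) := by
      rw [pv_enum_foldl_snd
        (fun (w : PySem.Dict String Int) (row : List String) =>
          (PySem.List.enumerate row).foldl
            (fun (w : PySem.Dict String Int) (yc : Int × String) =>
              (w.setdefault yc.2 0).insert yc.2 ((w.setdefault yc.2 0).getD yc.2 0 + 1)) w)
        m 0 PySem.Dict.empty]
      rw [PySem.List.foldl_congr_mem m _ _ PySem.Dict.empty (fun acc row _ => henum acc row)]
      rw [← List.foldl_flatMap]
      rw [PySem.List.foldl_congr_mem (m.flatMap (fun row => row)) _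
        (fun (w : PySem.Dict String Int) (c : String) => w.modify c 0 (fun v => v + 1))
        PySem.Dict.empty (fun acc c _ => pv_weights_step_eq acc c)]
      rfl
    have h2 : m.foldl (fun w row =>
          row.foldl (fun (w : PySem.Dict String Int) tile => w.insert tile (w.getD tile 0 + 1)) w)
        PySem.Dict.empty
        = PySem.Dict.counter (m.flatMap (fun row => row)) := by
      rw [← List.foldl_flatMap]
      exact PySem.Dict.foldl_insert_getD_add_one_eq_counter _
    rw [h1, h2]
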